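-- pv_equiv track=rewrite | github.com/lschwartze/chomp | chomp.py | categories
-- ===== SOURCE A (Python) =====
-- import copy
--
-- def categories(n):
--     #define positions that are already known
--     N0 = [[0 for i in range(n)] for j in range(n)]
--     N1 = copy.deepcopy(N0)
--     N2 = copy.deepcopy(N0)
--     P1 = copy.deepcopy(N0)
--     P2 = copy.deepcopy(N0)
--     for i in range(n):
--         for j in range(n):
--             N1[n-1][j] = 1
--             N2[i][0] = 1
--             P1[n-1][0] = 1
--             P2[n-1][j] = 1
--             P2[i][0] = 1
--     N = [N0, N1, N2]
--     P = [P1, P2]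
--     return N, P
-- ===== SOURCE B (Python) =====
-- def categories(n):
--     # row-level assembly: each matrix is n-1 copies of a body row plus one last row,
--     # built from three precomputed rows (all-zeros, all-ones, one-then-zeros)
--     zeros = [0] * n
--     ones = [1] * n
--     e0 = [1] * min(n, 1) + [0] * (n - 1)
--     def mat(body, last):
--         return [list(body) for _ in range(n - 1)] + ([list(last)] if n > 0 else [])
--     return [mat(zeros, zeros), mat(zeros, ones), mat(e0, e0)], [mat(zeros, e0), mat(e0, ones)]
-- ===== Notes on version B (the rewrite author's own statement) =====
-- stated objective: simpler
-- what changed: B assembles each matrix at row level - (n-1) copies of a shared body row plus one distinct last row, chosen from three precomputed rows (all-zeros, all-ones, one-then-zeros) - via a common helper, with no per-cell conditionals, no nested index loops and no overwrite pass.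
import Mathlib
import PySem

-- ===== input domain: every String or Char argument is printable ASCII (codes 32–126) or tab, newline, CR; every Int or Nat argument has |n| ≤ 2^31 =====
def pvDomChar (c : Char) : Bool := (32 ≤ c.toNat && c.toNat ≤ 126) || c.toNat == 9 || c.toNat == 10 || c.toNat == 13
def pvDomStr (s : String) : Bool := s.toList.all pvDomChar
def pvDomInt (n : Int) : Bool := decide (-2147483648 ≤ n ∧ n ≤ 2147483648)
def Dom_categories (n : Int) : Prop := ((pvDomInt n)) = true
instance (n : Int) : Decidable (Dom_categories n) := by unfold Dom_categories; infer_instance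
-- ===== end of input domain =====

-- B assembles each matrix at row level ((n-1) body rows plus one last row, from three precomputed
-- rows) instead of A's zero-matrix-then-overwrite nested loop; return value only, no mutation observable.

-- ===== PORT A =====
-- Python 'a[i][j] = 1'; exact whenever 0 ≤ i < len a and 0 ≤ j < len a[i],
-- which holds at every assignment A's loop actually executes (loop body runs only when n ≥ 1).
def pySet2 (a : List (List Int)) (i j : Int) : List (List Int) :=
  a.set i.toNat ((a.getD i.toNat []).set j.toNat 1)

def categories (n : Int) : List (List (List Int)) × List (List (List Int)) :=
  let N0 := (PySem.List.pyRange 0 n 1).map (fun _i => (PySem.List.pyRange 0 n 1).map (fun _j => (0 : Int)))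
  let s := (PySem.List.pyRange 0 n 1).foldl
    (fun (s : List (List Int) × List (List Int) × List (List Int) × List (List Int)) i =>
      (PySem.List.pyRange 0 n 1).foldl
        (fun s j =>
          (pySet2 s.1 (n-1) j, pySet2 s.2.1 i 0, pySet2 s.2.2.1 (n-1) 0,
           pySet2 (pySet2 s.2.2.2 (n-1) j) i 0))
        s)
    (N0, N0, N0, N0)
  ([N0, s.1, s.2.1], [s.2.2.1, s.2.2.2])

-- ===== PORT B =====
-- '[list(body) for _ in range(n-1)] + ([list(last)] if n > 0 else [])'
def pvMat (n : Int) (body last : List Int) : List (List Int) :=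
  List.replicate (n - 1).toNat body ++ (if n > 0 then [last] else [])

def categories_alt (n : Int) : List (List (List Int)) × List (List (List Int)) :=
  let zeros := List.replicate n.toNat (0 : Int)
  let ones := List.replicate n.toNat (1 : Int)
  let e0 := List.replicate (min n 1).toNat (1 : Int) ++ List.replicate (n - 1).toNat (0 : Int)
  ([pvMat n zeros zeros, pvMat n zeros ones, pvMat n e0 e0],
   [pvMat n zeros e0, pvMat n e0 ones])

-- ===== PRECONDITION & SPEC =====
def Spec_categories (n : Int) (out : List (List (List Int)) × List (List (List Int))) : Prop := out = categories_alt n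
instance (n : Int) (out : List (List (List Int)) × List (List (List Int))) : Decidable (Spec_categories n out) := by unfold Spec_categories; infer_instance

-- ===== CLAIM (what is proved, stated in full; the proofs are below) =====
def Claim_equal_categories : Prop := ∀ (n : Int), Dom_categories n → Spec_categories n (categories n)

-- ===== LEMMAS AND PROOFS =====

-- matrix represented as a map over List.range, and a 'set one cell to 1' on it
def mkM (m : Nat) (f : Nat → Nat → Int) : List (List Int) :=
  (List.range m).map (fun i => (List.range m).map (f i))

def setC (x : List (List Int)) (i j : Nat) : List (List Int) :=
  x.set i ((x.getD i []).set j 1)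

def updF (f : Nat → Nat → Int) (a b : Nat) : Nat → Nat → Int :=
  fun i j => if i = a ∧ j = b then 1 else f i j

theorem set_map_range {β : Type} (m a : Nat) (g : Nat → β) (x : β) (_ha : a < m) :
    ((List.range m).map g).set a x = (List.range m).map (fun i => if i = a then x else g i) := by
  apply List.ext_getElem
  · simp
  · intro i h1 h2
    simp only [List.getElem_set, List.getElem_map, List.getElem_range]
    split_ifs with h h' h' <;> first | rfl | omega

theorem getD_map_range' {β : Type} (m a : Nat) (g : Nat → β) (d : β) (ha : a < m) :
    ((List.range m).map g).getD a d = g a := by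
  rw [List.getD_eq_getElem?_getD]
  simp [ha]

theorem setC_mk (m a b : Nat) (f : Nat → Nat → Int) (ha : a < m) (hb : b < m) :
    setC (mkM m f) a b = mkM m (updF f a b) := by
  unfold setC mkM
  rw [getD_map_range' m a _ _ ha, set_map_range m b _ _ hb, set_map_range m a _ _ ha]
  congr 1
  funext i
  by_cases hi : i = a
  · subst hi
    simp [updF]
  · simp [hi, updF]

theorem foldl_setC (m : Nat) (L : List (Nat × Nat)) (f : Nat → Nat → Int)
    (h : ∀ p ∈ L, p.1 < m ∧ p.2 < m) :
    L.foldl (fun a p => setC a p.1 p.2) (mkM m f)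
      = mkM m (fun i j => if (i, j) ∈ L then 1 else f i j) := by
  induction L generalizing f with
  | nil => simp [mkM]
  | cons p L ih =>
    have hp := h p (by simp)
    simp only [List.foldl_cons]
    rw [setC_mk m p.1 p.2 f hp.1 hp.2, ih _ (fun q hq => h q (by simp [hq]))]
    unfold mkM updF
    congr 1
    funext i
    congr 1
    funext j
    by_cases h1 : (i, j) ∈ L
    · simp [h1]
    · by_cases h2 : i = p.1 ∧ j = p.2
      · simp [h2]
      · simp [h1, h2, Prod.ext_iff]

theorem foldl_foldl_flatMap {α β γ : Type} (L : List α) (M : α → List β)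
    (g : γ → β → γ) (init : γ) :
    L.foldl (fun s x => (M x).foldl g s) init = (L.flatMap M).foldl g init := by
  induction L generalizing init with
  | nil => simp
  | cons x L ih => simp [List.flatMap_cons, List.foldl_append, ih]

theorem foldl_prod4 {α A B C D : Type} (L : List α)
    (g1 : A → α → A) (g2 : B → α → B) (g3 : C → α → C) (g4 : D → α → D)
    (s1 : A) (s2 : B) (s3 : C) (s4 : D) :
    L.foldl (fun (s : A × B × C × D) x => (g1 s.1 x, g2 s.2.1 x, g3 s.2.2.1 x, g4 s.2.2.2 x))
        (s1, s2, s3, s4)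
      = (L.foldl g1 s1, L.foldl g2 s2, L.foldl g3 s3, L.foldl g4 s4) := by
  induction L generalizing s1 s2 s3 s4 with
  | nil => rfl
  | cons x L ih => simp [List.foldl_cons, ih]

theorem mk_congr_mem (m : Nat) (f g : Nat → Nat → Int)
    (h : ∀ i < m, ∀ j < m, f i j = g i j) : mkM m f = mkM m g := by
  unfold mkM
  apply List.map_congr_left
  intro i hi
  apply List.map_congr_left
  intro j hj
  exact h i (List.mem_range.mp hi) j (List.mem_range.mp hj)

theorem pySet2_toNat (a : List (List Int)) (i j : Int) :
    pySet2 a i j = setC a i.toNat j.toNat := rfl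

-- closed forms of the four loop-built matrices, at the Nat level
theorem comp1 (m : Nat) (hm : 0 < m) :
    (List.range m).foldl
        (fun a (_i : Nat) => (List.range m).foldl (fun a j => setC a (m-1) j) a)
        (mkM m (fun _ _ => 0))
      = mkM m (fun i _j => if i = m-1 then 1 else 0) := by
  have h1 : ∀ (a : List (List Int)),
      (List.range m).foldl (fun a j => setC a (m-1) j) a
        = ((List.range m).map (fun j => ((m-1 : Nat), j))).foldl (fun a p => setC a p.1 p.2) a := by
    intro a; rw [List.foldl_map]
  simp only [h1]
  rw [foldl_foldl_flatMap, foldl_setC]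
  · apply mk_congr_mem
    intro i hi j hj
    have hiff : ((i, j) ∈ (List.range m).flatMap
        (fun _i => (List.range m).map (fun j => ((m-1 : Nat), j)))) ↔ (i = m-1) := by
      simp only [List.mem_flatMap, List.mem_map, List.mem_range, Prod.mk.injEq]
      constructor
      · rintro ⟨a, ha, b, hb, hx, hy⟩; omega
      · intro h; exact ⟨0, hm, j, hj, by omega, by omega⟩
    simp only [hiff]
  · intro p hp
    simp only [List.mem_flatMap, List.mem_map, List.mem_range] at hp
    obtain ⟨a, ha, b, hb, rfl⟩ := hp
    refine ⟨?_, ?_⟩ <;> simp <;> omega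

theorem comp2 (m : Nat) (hm : 0 < m) :
    (List.range m).foldl
        (fun a (i : Nat) => (List.range m).foldl (fun a (_j : Nat) => setC a i 0) a)
        (mkM m (fun _ _ => 0))
      = mkM m (fun _i j => if j = 0 then 1 else 0) := by
  have h1 : ∀ (i : Nat) (a : List (List Int)),
      (List.range m).foldl (fun a (_j : Nat) => setC a i 0) a
        = ((List.range m).map (fun (_j : Nat) => (i, (0 : Nat)))).foldl (fun a p => setC a p.1 p.2) a := by
    intro i a; rw [List.foldl_map]
  simp only [h1]
  rw [foldl_foldl_flatMap, foldl_setC]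
  · apply mk_congr_mem
    intro i hi j hj
    have hiff : ((i, j) ∈ (List.range m).flatMap
        (fun i => (List.range m).map (fun (_j : Nat) => (i, (0 : Nat))))) ↔ (j = 0) := by
      simp only [List.mem_flatMap, List.mem_map, List.mem_range, Prod.mk.injEq]
      constructor
      · rintro ⟨a, ha, b, hb, hx, hy⟩; omega
      · intro h; exact ⟨i, hi, 0, hm, by omega, by omega⟩
    simp only [hiff]
  · intro p hp
    simp only [List.mem_flatMap, List.mem_map, List.mem_range] at hp
    obtain ⟨a, ha, b, hb, rfl⟩ := hp
    refine ⟨?_, ?_⟩ <;> simp <;> omega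

theorem comp3 (m : Nat) (hm : 0 < m) :
    (List.range m).foldl
        (fun a (_i : Nat) => (List.range m).foldl (fun a (_j : Nat) => setC a (m-1) 0) a)
        (mkM m (fun _ _ => 0))
      = mkM m (fun i j => if i = m-1 ∧ j = 0 then 1 else 0) := by
  have h1 : ∀ (a : List (List Int)),
      (List.range m).foldl (fun a (_j : Nat) => setC a (m-1) 0) a
        = ((List.range m).map (fun (_j : Nat) => ((m-1 : Nat), (0 : Nat)))).foldl (fun a p => setC a p.1 p.2) a := by
    intro a; rw [List.foldl_map]
  simp only [h1]
  rw [foldl_foldl_flatMap, foldl_setC]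
  · apply mk_congr_mem
    intro i hi j hj
    have hiff : ((i, j) ∈ (List.range m).flatMap
        (fun _i => (List.range m).map (fun (_j : Nat) => ((m-1 : Nat), (0 : Nat))))) ↔ (i = m-1 ∧ j = 0) := by
      simp only [List.mem_flatMap, List.mem_map, List.mem_range, Prod.mk.injEq]
      constructor
      · rintro ⟨a, ha, b, hb, hx, hy⟩; omega
      · intro h; exact ⟨0, hm, 0, hm, by omega, by omega⟩
    simp only [hiff]
  · intro p hp
    simp only [List.mem_flatMap, List.mem_map, List.mem_range] at hp
    obtain ⟨a, ha, b, hb, rfl⟩ := hp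
    refine ⟨?_, ?_⟩ <;> simp <;> omega

theorem comp4 (m : Nat) (hm : 0 < m) :
    (List.range m).foldl
        (fun a (i : Nat) => (List.range m).foldl (fun a j => setC (setC a (m-1) j) i 0) a)
        (mkM m (fun _ _ => 0))
      = mkM m (fun i j => if i = m-1 ∨ j = 0 then 1 else 0) := by
  have h1 : ∀ (i : Nat) (a : List (List Int)),
      (List.range m).foldl (fun a j => setC (setC a (m-1) j) i 0) a
        = ((List.range m).flatMap (fun j => [((m-1 : Nat), j), (i, (0 : Nat))])).foldl (fun a p => setC a p.1 p.2) a := by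
    intro i a
    rw [← foldl_foldl_flatMap]
    rfl
  simp only [h1]
  rw [foldl_foldl_flatMap, foldl_setC]
  · apply mk_congr_mem
    intro i hi j hj
    have hiff : ((i, j) ∈ (List.range m).flatMap
        (fun i => (List.range m).flatMap (fun j => [((m-1 : Nat), j), (i, (0 : Nat))]))) ↔ (i = m-1 ∨ j = 0) := by
      simp only [List.mem_flatMap, List.mem_range, List.mem_cons,
        List.not_mem_nil, or_false, Prod.mk.injEq]
      constructor
      · rintro ⟨a, ha, b, hb, ⟨hx, hy⟩ | ⟨hx, hy⟩⟩ <;> omega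
      · rintro (h | h)
        · exact ⟨0, hm, j, hj, Or.inl ⟨by omega, by omega⟩⟩
        · exact ⟨i, hi, 0, hm, Or.inr ⟨by omega, by omega⟩⟩
    simp only [hiff]
  · intro p hp
    simp only [List.mem_flatMap, List.mem_range, List.mem_cons, List.not_mem_nil, or_false] at hp
    obtain ⟨a, ha, b, hb, rfl | rfl⟩ := hp <;> (refine ⟨?_, ?_⟩ <;> simp <;> omega)

-- B-side: row-level assembly written as mkM
theorem rep_map (m : Nat) (x : Int) :
    List.replicate m x = (List.range m).map (fun _ => x) := by
  simp

theorem matEq (m : Nat) (hm : 0 < m) (fb fl : Nat → Int) :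
    List.replicate (m - 1) ((List.range m).map fb) ++ [(List.range m).map fl]
      = mkM m (fun i j => if i = m - 1 then fl j else fb j) := by
  apply List.ext_getElem
  · simp [mkM]; omega
  · intro i h1 h2
    unfold mkM
    simp only [List.getElem_map, List.getElem_range]
    by_cases hi : i < m - 1
    · rw [List.getElem_append_left (by simpa using hi)]
      simp only [List.getElem_replicate]
      apply List.map_congr_left
      intro j _
      rw [if_neg (by omega)]
    · have hi' : i = m - 1 := by simp at h1; omega
      rw [List.getElem_append_right (by simpa using hi)]
      simp only [List.length_replicate]
      have : i - (m - 1) = 0 := by omega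
      simp only [this, List.getElem_cons_zero]
      apply List.map_congr_left
      intro j _
      rw [if_pos hi']

theorem e0_eq (m : Nat) (hm : 0 < m) :
    List.replicate 1 (1 : Int) ++ List.replicate (m - 1) (0 : Int)
      = (List.range m).map (fun j => if j = 0 then (1 : Int) else 0) := by
  apply List.ext_getElem
  · simp; omega
  · intro i hl hr
    simp only [List.getElem_map, List.getElem_range]
    by_cases hi : i = 0
    · subst hi; rfl
    · rw [List.getElem_append_right (by simp; omega)]
      simp [hi]

theorem categories_eq (n : Int) : categories n = categories_alt n := by
  rcases (by omega : n ≤ 0 ∨ 0 < n) with hle | hpos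
  · unfold categories categories_alt pvMat
    have h1 : ((n : Int) - 1).toNat = 0 := by omega
    have h2 : (n : Int).toNat = 0 := by omega
    simp [PySem.List.pyRange_one_eq_nil hle, h1, h2, if_neg (by omega : ¬ n > 0)]
  · obtain ⟨m, rfl⟩ : ∃ m : Nat, n = (m : Int) := ⟨n.toNat, by omega⟩
    have hm : 0 < m := by exact_mod_cast hpos
    have hm1 : ((m : Int) - 1).toNat = m - 1 := by omega
    -- A side
    unfold categories
    simp only [PySem.List.pyRange_zero_natCast, List.foldl_map, List.map_map,
      pySet2_toNat, Int.toNat_natCast, Int.toNat_zero, hm1, Function.comp_def]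
    have hZ : (List.range m).map (fun _i : Nat => (List.range m).map (fun _j : Nat => (0 : Int)))
        = mkM m (fun _ _ => 0) := rfl
    rw [hZ]
    have hin : ∀ (i : Nat) (s : List (List Int) × List (List Int) × List (List Int) × List (List Int)),
        (List.range m).foldl
          (fun s j => (setC s.1 (m-1) j, setC s.2.1 i 0, setC s.2.2.1 (m-1) 0,
            setC (setC s.2.2.2 (m-1) j) i 0)) s
          = ((List.range m).foldl (fun a j => setC a (m-1) j) s.1,
             (List.range m).foldl (fun a (_j : Nat) => setC a i 0) s.2.1,
             (List.range m).foldl (fun a (_j : Nat) => setC a (m-1) 0) s.2.2.1,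
             (List.range m).foldl (fun a j => setC (setC a (m-1) j) i 0) s.2.2.2) := by
      intro i s
      obtain ⟨s1, s2, s3, s4⟩ := s
      exact foldl_prod4 (List.range m)
        (fun a j => setC a (m-1) j) (fun a (_j : Nat) => setC a i 0)
        (fun a (_j : Nat) => setC a (m-1) 0) (fun a j => setC (setC a (m-1) j) i 0)
        s1 s2 s3 s4
    simp only [hin]
    rw [foldl_prod4 (List.range m)
      (fun b (_i : Nat) => (List.range m).foldl (fun a j => setC a (m-1) j) b)
      (fun b (i : Nat) => (List.range m).foldl (fun a (_j : Nat) => setC a i 0) b)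
      (fun b (_i : Nat) => (List.range m).foldl (fun a (_j : Nat) => setC a (m-1) 0) b)
      (fun b (i : Nat) => (List.range m).foldl (fun a j => setC (setC a (m-1) j) i 0) b)
      (mkM m (fun _ _ => 0)) (mkM m (fun _ _ => 0)) (mkM m (fun _ _ => 0)) (mkM m (fun _ _ => 0))]
    rw [comp1 m hm, comp2 m hm, comp3 m hm, comp4 m hm]
    -- B side
    unfold categories_alt pvMat
    have hmin : (min ((m : Int)) 1).toNat = 1 := by omega
    simp only [Int.toNat_natCast, hm1, if_pos hpos, hmin]
    rw [e0_eq m hm, rep_map m (0 : Int), rep_map m (1 : Int)]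
    simp only [matEq m hm]
    simp only [Prod.mk.injEq, List.cons.injEq, and_true]
    refine ⟨⟨?_, ?_, ?_⟩, ?_, ?_⟩ <;>
      first
        | trivial
        | (apply mk_congr_mem; intro i hi j hj; split_ifs <;> simp_all)

-- ===== VERDICT (by name: the statement is the Claim_ definition above) =====
theorem categories_spec : Claim_equal_categories := by
  intro n _
  unfold Spec_categories
  exact categories_eq n
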